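-- pv_equiv track=rewrite | github.com/Systemofalam/Advent_of_code_2026 | Day10/Day10.py | min_lights
-- ===== SOURCE A (Python) =====
-- from collections import deque
--
-- def min_lights(pat, btns):
--     n = len(pat)
--     tgt = 0
--     for i, c in enumerate(pat):
--         if c == '#':
--             tgt |= 1 << i
--     masks = []
--     for inds in btns:
--         m = 0
--         for i in inds:
--             if 0 <= i < n:
--                 m |= 1 << i
--         if m:
--             masks.append(m)
--     if tgt == 0:
--         return 0
--     N = 1 << n
--     dist = [-1] * N
--     q = deque([0])
--     dist[0] = 0
--     while q:
--         s = q.popleft()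
--         d = dist[s] + 1
--         for m in masks:
--             ns = s ^ m
--             if dist[ns] == -1:
--                 if ns == tgt:
--                     return d
--                 dist[ns] = d
--                 q.append(ns)
--     return 0
-- ===== SOURCE B (Python) =====
-- def min_lights(pat, btns):
--     # Subset DP over buttons: best[x] = minimum number of button presses
--     # (each button used at most once; reuse never helps under XOR) whose
--     # combined toggle mask is x.  One pass per button, no state-space array.
--     n = len(pat)
--     tgt = 0
--     for i, c in enumerate(pat):
--         if c == '#':
--             tgt |= 1 << i
--     if tgt == 0:
--         return 0
--     best = {0: 0}
--     for inds in btns: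
--         m = 0
--         for i in inds:
--             if 0 <= i < n:
--                 m |= 1 << i
--         if m == 0:
--             continue
--         for t, c in list(best.items()):
--             nt = t ^ m
--             nc = c + 1
--             if best.get(nt, nc + 1) > nc:
--                 best[nt] = nc
--     r = best.get(tgt)
--     return r if r is not None else 0
-- ===== Notes on version B (the rewrite author's own statement) =====
-- stated objective: faster
-- what changed: Replaced A's breadth-first search over the whole 2^n light-state space (with a size-2^n distance array and a queue) by a per-button subset DP: a dict of reachable XOR values mapped to their minimum press counts, relaxed once per button, exploiting that pressing a button twice cancels so each button is needed at most once.
import Mathlib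
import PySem

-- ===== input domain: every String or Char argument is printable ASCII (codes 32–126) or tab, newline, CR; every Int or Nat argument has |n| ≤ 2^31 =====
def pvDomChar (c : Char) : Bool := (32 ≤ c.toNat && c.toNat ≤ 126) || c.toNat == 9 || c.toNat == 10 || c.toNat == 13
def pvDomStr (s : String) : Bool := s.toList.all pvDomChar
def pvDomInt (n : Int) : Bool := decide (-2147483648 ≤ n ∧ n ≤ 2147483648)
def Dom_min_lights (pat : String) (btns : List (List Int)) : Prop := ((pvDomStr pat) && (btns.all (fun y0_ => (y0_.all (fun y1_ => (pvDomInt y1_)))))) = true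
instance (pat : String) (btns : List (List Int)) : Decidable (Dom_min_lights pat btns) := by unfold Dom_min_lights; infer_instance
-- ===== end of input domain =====

-- B replaces A's breadth-first search over all 2^n light states by a subset DP over the
-- buttons themselves (one relaxation pass per button over a dict of reachable XORs);
-- objective: faster when the button count is small compared to the light count.

-- ===== PORT A =====
-- helper shared by BOTH ports: the mask-building inner loop 'm = 0; for i in inds: if 0 <= i < n: m |= 1 << i'
-- (textually identical in Source A and Source B).  '1 << i' with i ≥ 0 is '1 <<< i.toNat' (exact: the branch guarantees 0 ≤ i).
def pvMask (n : Int) (inds : List Int) : Int :=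
  inds.foldl (fun m i => if 0 ≤ i ∧ i < n then PySem.Int.bor m (1 <<< i.toNat) else m) 0

-- 'tgt |= 1 << i' over enumerate(pat) (same loop in both Pythons)
def pvTgt (pat : String) : Int :=
  (PySem.List.enumerate pat.toList 0).foldl
    (fun tgt ic => if ic.2 = '#' then PySem.Int.bor tgt (1 <<< ic.1.toNat) else tgt) 0

-- inner 'for m in masks' body of A's BFS loop; dist[ns] / dist[ns] = d are in range on every
-- reachable state (s, ns < 2^n), so pyGetD/pySetD are exact here.
def pvStep (tgt s d : Int) : List Int → List Int → List Int → (Option Int × List Int × List Int)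
  | [], dist, q => (none, dist, q)
  | m :: ms, dist, q =>
    let ns := PySem.Int.bxor s m
    if PySem.List.pyGetD dist ns 0 = -1 then
      if ns = tgt then (some d, dist, q)
      else pvStep tgt s d ms (PySem.List.pySetD dist ns d) (q ++ [ns])
    else pvStep tgt s d ms dist q

-- A's 'while q' loop; fuel = 2^n bounds the iteration count (each iteration pops one element
-- and every push marks a previously unmarked state, see pv_fuel in the proofs).
def pvBFS (tgt : Int) (masks : List Int) : Nat → List Int → List Int → Int
  | 0, _, _ => 0
  | fuel + 1, dist, q =>
    match q with
    | [] => 0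
    | s :: q' =>
      let d := PySem.List.pyGetD dist s 0 + 1
      match pvStep tgt s d masks dist q' with
      | (some r, _, _) => r
      | (none, dist', q'') => pvBFS tgt masks fuel dist' q''

def min_lights (pat : String) (btns : List (List Int)) : Int :=
  let n := PySem.Str.len pat
  let tgt := pvTgt pat
  let masks := btns.foldl (fun masks inds =>
    let m := pvMask n inds
    if m ≠ 0 then masks ++ [m] else masks) []
  if tgt = 0 then 0
  else
    let N := (1 : Int) <<< n.toNat
    let dist := PySem.List.pySetD (PySem.List.pyRepeat [(-1 : Int)] N) 0 0
    pvBFS tgt masks N.toNat dist [0]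

-- ===== PORT B =====
-- 'for t, c in list(best.items()): …' relaxation pass for one button mask m
def pvRelax (m : Int) : List (Int × Int) → PySem.Dict Int Int → PySem.Dict Int Int
  | [], best => best
  | (t, c) :: rest, best =>
    let nt := PySem.Int.bxor t m
    let nc := c + 1
    if best.getD nt (nc + 1) > nc then pvRelax m rest (best.insert nt nc)
    else pvRelax m rest best

def min_lights_alt (pat : String) (btns : List (List Int)) : Int :=
  let n := PySem.Str.len pat
  let tgt := pvTgt pat
  if tgt = 0 then 0
  else
    let best := btns.foldl (fun best inds =>
      let m := pvMask n inds
      if m = 0 then best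
      else pvRelax m best.items best) (PySem.Dict.empty.insert 0 0)
    match best.get? tgt with
    | some r => r
    | none => 0

-- ===== PRECONDITION & SPEC =====
def Spec_min_lights (pat : String) (btns : List (List Int)) (out : Int) : Prop := out = min_lights_alt pat btns
instance (pat : String) (btns : List (List Int)) (out : Int) : Decidable (Spec_min_lights pat btns out) := by unfold Spec_min_lights; infer_instance

-- ===== CLAIM (what is proved, stated in full; the proofs are below) =====
def Claim_equal_min_lights : Prop := ∀ (pat : String) (btns : List (List Int)), Dom_min_lights pat btns → Spec_min_lights pat btns (min_lights pat btns)

-- ===== LEMMAS AND PROOFS =====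

/-! ### Math layer: XOR of a list of naturals, subset / sequence reachability -/

def pvXorN (l : List Nat) : Nat := l.foldr (· ^^^ ·) 0

/-- minimum-subset predicate: some sublist of `P` of length `k` XORs to `t` -/
def SubP (P : List Nat) (t k : Nat) : Prop := ∃ S, S.Sublist P ∧ S.length = k ∧ pvXorN S = t

/-- sequence predicate: some length-`k` sequence of elements of `P` XORs to `t` -/
def SeqP (P : List Nat) (t k : Nat) : Prop := ∃ l, (∀ x ∈ l, x ∈ P) ∧ l.length = k ∧ pvXorN l = t

lemma pvXorN_cons (a : Nat) (l : List Nat) : pvXorN (a :: l) = a ^^^ pvXorN l := rfl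

lemma pv_xorcancel (a b : Nat) : a ^^^ b ^^^ b = a := by
  rw [Nat.xor_assoc, Nat.xor_self, Nat.xor_zero]

lemma pvXorN_append (a b : List Nat) : pvXorN (a ++ b) = pvXorN a ^^^ pvXorN b := by
  induction a with
  | nil => simp [pvXorN]
  | cons x xs ih => simp [pvXorN_cons, List.cons_append, ih, Nat.xor_assoc]

lemma pvXorN_perm {l₁ l₂ : List Nat} (h : l₁.Perm l₂) : pvXorN l₁ = pvXorN l₂ :=
  List.Perm.foldr_eq (lcomm := ⟨fun a b c => by
    rw [← Nat.xor_assoc, Nat.xor_comm a b, Nat.xor_assoc]⟩) h 0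

lemma seqP_zero (P : List Nat) : SeqP P 0 0 := ⟨[], by simp, rfl, rfl⟩

lemma subP_zero (P : List Nat) : SubP P 0 0 := ⟨[], List.nil_sublist P, rfl, rfl⟩

lemma seqP_eq_zero {P : List Nat} {t : Nat} (h : SeqP P t 0) : t = 0 := by
  obtain ⟨l, _, hl, hx⟩ := h
  have : l = [] := List.length_eq_zero_iff.mp hl
  subst this; exact hx.symm ▸ rfl

lemma seqP_step {P : List Nat} {t k m : Nat} (h : SeqP P t k) (hm : m ∈ P) :
    SeqP P (t ^^^ m) (k + 1) := by
  obtain ⟨l, hsub, hlen, hx⟩ := h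
  refine ⟨l ++ [m], ?_, by simp [hlen], ?_⟩
  · intro x hx'
    rcases List.mem_append.mp hx' with h' | h'
    · exact hsub x h'
    · simp at h'; subst h'; exact hm
  · rw [pvXorN_append, hx]; simp [pvXorN_cons, pvXorN]

lemma seqP_pred {P : List Nat} {t k : Nat} (h : SeqP P t (k + 1)) :
    ∃ m ∈ P, SeqP P (t ^^^ m) k := by
  obtain ⟨l, hsub, hlen, hx⟩ := h
  rcases List.eq_nil_or_concat l with rfl | ⟨l', b, rfl⟩
  · simp at hlen
  · rw [List.concat_eq_append] at hsub hlen hx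
    have hxb : pvXorN l' ^^^ b = t := by rw [← hx, pvXorN_append]; simp [pvXorN_cons, pvXorN]
    refine ⟨b, hsub b (by simp), l', fun x hx' => hsub x (by simp [hx']), by simpa using hlen, ?_⟩
    rw [← hxb, pv_xorcancel]

lemma subP_seqP {P : List Nat} {t k : Nat} (h : SubP P t k) : SeqP P t k := by
  obtain ⟨S, hS, h1, h2⟩ := h
  exact ⟨S, fun x hx => hS.subset hx, h1, h2⟩

lemma seqP_subP {P : List Nat} {t k : Nat} (h : SeqP P t k) : ∃ j, j ≤ k ∧ SubP P t j := by
  obtain ⟨l, hsub, hlen, hx⟩ := h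
  subst hlen; subst hx
  suffices H : ∀ (N : Nat) (l : List Nat), l.length ≤ N → (∀ x ∈ l, x ∈ P) →
      ∃ j, j ≤ l.length ∧ SubP P (pvXorN l) j by
    exact H l.length l le_rfl hsub
  intro N
  induction N with
  | zero =>
    intro l hl _
    have : l = [] := List.length_eq_zero_iff.mp (Nat.le_zero.mp hl)
    subst this
    exact ⟨0, le_rfl, subP_zero P⟩
  | succ N ihN =>
    intro l hl hsub
    by_cases hnd : l.Nodup
    · obtain ⟨S, hperm, hS⟩ := List.Nodup.subperm hnd hsub
      exact ⟨l.length, le_rfl, ⟨S, hS, hperm.length_eq, pvXorN_perm hperm⟩⟩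
    · have hex : ∃ a, 2 ≤ l.count a := by
        rw [List.nodup_iff_count_le_one] at hnd; push_neg at hnd
        obtain ⟨a, ha⟩ := hnd; exact ⟨a, by omega⟩
      obtain ⟨x, hx2⟩ := hex
      have hx1 : x ∈ l := List.count_pos_iff.mp (by omega)
      have hx1' : x ∈ l.erase x := by
        apply List.count_pos_iff.mp
        rw [List.count_erase_self]; omega
      have hperm : l.Perm (x :: x :: (l.erase x).erase x) :=
        (List.perm_cons_erase hx1).trans ((List.perm_cons_erase hx1').cons x)
      have hxeq : pvXorN l = pvXorN ((l.erase x).erase x) := by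
        rw [pvXorN_perm hperm, pvXorN_cons, pvXorN_cons, ← Nat.xor_assoc, Nat.xor_self,
          Nat.zero_xor]
      have hlen2 : l.length = ((l.erase x).erase x).length + 2 := by
        have := hperm.length_eq; simpa using this
      obtain ⟨j, hj, hSub⟩ := ihN ((l.erase x).erase x) (by omega)
        (fun y hy => hsub y (List.erase_subset (List.erase_subset hy)))
      exact ⟨j, by omega, hxeq ▸ hSub⟩

lemma subP_append {P : List Nat} {m t k : Nat} :
    SubP (P ++ [m]) t k ↔ SubP P t k ∨ ∃ k', k = k' + 1 ∧ SubP P (t ^^^ m) k' := by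
  constructor
  · rintro ⟨S, hS, hlen, hx⟩
    rcases List.sublist_append_iff.mp hS with ⟨S1, S2, rfl, h1, h2⟩
    rcases List.sublist_singleton.mp h2 with rfl | rfl
    · exact Or.inl ⟨S1, h1, by simpa using hlen, by simpa [pvXorN_append, pvXorN] using hx⟩
    · refine Or.inr ⟨S1.length, by simpa using hlen.symm, S1, h1, rfl, ?_⟩
      have : pvXorN (S1 ++ [m]) = pvXorN S1 ^^^ m := by
        rw [pvXorN_append]; simp [pvXorN_cons, pvXorN]
      rw [← hx, this, pv_xorcancel]
  · rintro (⟨S, h1, h2, h3⟩ | ⟨k', rfl, S, h1, h2, h3⟩)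
    · exact ⟨S, h1.trans (List.sublist_append_left P [m]), h2, h3⟩
    · refine ⟨S ++ [m], List.Sublist.append h1 (List.Sublist.refl [m]), by simp [h2], ?_⟩
      have hm1 : pvXorN [m] = m := by simp [pvXorN]
      rw [pvXorN_append, hm1, h3, pv_xorcancel]

lemma pv_exists_minimal {Q : Nat → Prop} (h : ∃ k, Q k) :
    ∃ k, Q k ∧ ∀ j, Q j → k ≤ j := by
  obtain ⟨k, hk⟩ := h
  suffices H : ∀ k, Q k → ∃ m, Q m ∧ ∀ j, Q j → m ≤ j by exact H k hk
  intro k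
  induction k using Nat.strong_induction_on with
  | _ k IH =>
    intro hk
    by_cases hmin : ∀ j, Q j → k ≤ j
    · exact ⟨k, hk, hmin⟩
    · push_neg at hmin
      obtain ⟨j, hQj, hj⟩ := hmin
      exact IH j hj hQj

/-! ### Cast layer: the Int-valued folds of the ports produce casts of bounded naturals -/

lemma pv_one_shiftLeft (k : Nat) : ((1:Int) <<< k) = ((2^k : Nat) : Int) := by
  simp [Int.shiftLeft_eq]

lemma pvMask_aux (nn : Nat) (inds : List Int) : ∀ (aN : Nat), aN < 2^nn →
    ∃ mN : Nat, List.foldl (fun m i => if 0 ≤ i ∧ i < ((nn : Nat) : Int)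
        then PySem.Int.bor m (1 <<< i.toNat) else m) ((aN : Nat) : Int) inds = ((mN : Nat) : Int)
      ∧ mN < 2^nn := by
  induction inds with
  | nil => exact fun aN h => ⟨aN, rfl, h⟩
  | cons i rest ih =>
    intro aN h
    simp only [List.foldl_cons]
    by_cases hc : 0 ≤ i ∧ i < ((nn : Nat) : Int)
    · rw [if_pos hc]
      have hi : i.toNat < nn := by omega
      have hb : PySem.Int.bor ((aN : Nat) : Int) (1 <<< i.toNat)
          = (((aN ||| 2^i.toNat : Nat)) : Int) := by
        have h1 : ((1 : Nat) <<< i.toNat) = 2^i.toNat := by simp [Nat.shiftLeft_eq]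
        rw [h1]; exact PySem.Int.bor_natCast aN (2^i.toNat)
      rw [hb]
      exact ih _ (Nat.or_lt_two_pow h (Nat.pow_lt_pow_right (by norm_num) hi))
    · rw [if_neg hc]
      exact ih aN h

lemma pvMask_cast (nn : Nat) (inds : List Int) :
    ∃ mN : Nat, pvMask ((nn : Nat) : Int) inds = ((mN : Nat) : Int) ∧ mN < 2^nn := by
  have h := pvMask_aux nn inds 0 (Nat.two_pow_pos nn)
  simpa [pvMask] using h

lemma pvTgt_aux (nn : Nat) (cs : List Char) : ∀ (sN aN : Nat), sN + cs.length ≤ nn → aN < 2^nn →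
    ∃ tN : Nat, List.foldl (fun tgt ic => if ic.2 = '#' then PySem.Int.bor tgt (1 <<< ic.1.toNat)
        else tgt) ((aN : Nat) : Int) (PySem.List.enumerate cs ((sN : Nat) : Int)) = ((tN : Nat) : Int)
      ∧ tN < 2^nn := by
  induction cs with
  | nil => intro sN aN _ h; exact ⟨aN, by simp [PySem.List.enumerate], h⟩
  | cons c rest ih =>
    intro sN aN hle h
    rw [PySem.List.enumerate_cons]
    simp only [List.foldl_cons]
    have hcast : ((sN : Nat) : Int) + 1 = (((sN + 1 : Nat)) : Int) := by push_cast; ring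
    by_cases hc : c = '#'
    · rw [if_pos hc]
      have hsN : sN < nn := by simp at hle; omega
      have hb : PySem.Int.bor ((aN : Nat) : Int) (1 <<< ((sN : Nat) : Int).toNat)
          = (((aN ||| 2^sN : Nat)) : Int) := by
        rw [Int.toNat_natCast]
        have h1 : ((1 : Nat) <<< sN) = 2^sN := by simp [Nat.shiftLeft_eq]
        rw [h1]; exact PySem.Int.bor_natCast aN (2^sN)
      rw [hb, hcast]
      exact ih (sN + 1) _ (by simp at hle ⊢; omega)
        (Nat.or_lt_two_pow h (Nat.pow_lt_pow_right (by norm_num) hsN))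
    · rw [if_neg hc, hcast]
      exact ih (sN + 1) aN (by simp at hle ⊢; omega) h

lemma pvTgt_cast (pat : String) :
    ∃ tN : Nat, pvTgt pat = ((tN : Nat) : Int) ∧ tN < 2^(pat.toList.length) := by
  have h := pvTgt_aux (pat.toList.length) pat.toList 0 0 (by simp) (Nat.two_pow_pos _)
  simpa [pvTgt] using h

lemma pv_folds (nn : Nat) (btns : List (List Int)) : ∀ (acc : List Int) (d : PySem.Dict Int Int),
    ∃ PN : List Nat, (∀ p ∈ PN, 0 < p ∧ p < 2^nn) ∧
      List.foldl (fun masks inds =>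
        if pvMask ((nn : Nat) : Int) inds ≠ 0 then masks ++ [pvMask ((nn : Nat) : Int) inds]
        else masks) acc btns
        = acc ++ PN.map (fun p => ((p : Nat) : Int)) ∧
      List.foldl (fun best inds =>
        if pvMask ((nn : Nat) : Int) inds = 0 then best
        else pvRelax (pvMask ((nn : Nat) : Int) inds) best.items best) d btns
        = PN.foldl (fun b p => pvRelax ((p : Nat) : Int) b.items b) d := by
  induction btns with
  | nil => intro acc d; exact ⟨[], by simp, by simp, rfl⟩
  | cons inds rest ih =>
    intro acc d
    obtain ⟨mN, hm, hlt⟩ := pvMask_cast nn inds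
    by_cases h0 : mN = 0
    · subst h0
      obtain ⟨PN, hP, hA, hB⟩ := ih acc d
      have hz : pvMask ((nn : Nat) : Int) inds = 0 := by rw [hm]; norm_num
      refine ⟨PN, hP, ?_, ?_⟩
      · simp only [List.foldl_cons]
        rw [show (if pvMask ((nn : Nat) : Int) inds ≠ 0
            then acc ++ [pvMask ((nn : Nat) : Int) inds] else acc) = acc from by
          rw [if_neg (by rw [hz]; simp)]]
        exact hA
      · simp only [List.foldl_cons]
        rw [show (if pvMask ((nn : Nat) : Int) inds = 0 then d
            else pvRelax (pvMask ((nn : Nat) : Int) inds) d.items d) = d from by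
          rw [if_pos hz]]
        exact hB
    · have hz : pvMask ((nn : Nat) : Int) inds ≠ 0 := by
        rw [hm]; exact_mod_cast h0
      obtain ⟨PN, hP, hA, hB⟩ := ih (acc ++ [((mN : Nat) : Int)])
        (pvRelax ((mN : Nat) : Int) d.items d)
      refine ⟨mN :: PN, ?_, ?_, ?_⟩
      · intro p hp
        rcases List.mem_cons.mp hp with rfl | hp'
        · exact ⟨Nat.pos_of_ne_zero h0, hlt⟩
        · exact hP p hp'
      · simp only [List.foldl_cons]
        rw [show (if pvMask ((nn : Nat) : Int) inds ≠ 0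
            then acc ++ [pvMask ((nn : Nat) : Int) inds] else acc)
            = acc ++ [((mN : Nat) : Int)] from by rw [if_pos hz, hm]]
        rw [hA]
        simp
      · simp only [List.foldl_cons]
        rw [show (if pvMask ((nn : Nat) : Int) inds = 0 then d
            else pvRelax (pvMask ((nn : Nat) : Int) inds) d.items d)
            = pvRelax ((mN : Nat) : Int) d.items d from by rw [if_neg hz, hm]]
        rw [hB]

/-! ### B side: the relaxation pass computes a pointwise minimum, and the button fold
    maintains the minimum-subset invariant -/

def pvRlx (o s : Option Int) : Option Int :=
  match s with
  | none => o
  | some c =>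
    match o with
    | none => some (c + 1)
    | some v => some (min v (c + 1))

lemma pv_relax_go (mN : Nat) (orig : PySem.Dict Int Int)
    (hnd : orig.keys.Nodup) (hneg : ∀ u : Int, u < 0 → orig.get? u = none) :
    ∀ (items done : List (Int × Int)) (cur : PySem.Dict Int Int),
      orig.items = done ++ items →
      cur.keys.Nodup →
      (∀ u : Int, u < 0 → cur.get? u = orig.get? u) →
      (∀ uN : Nat, cur.get? ((uN : Nat) : Int) =
        if (((uN ^^^ mN : Nat)) : Int) ∈ done.map Prod.fst
        then pvRlx (orig.get? ((uN : Nat) : Int)) (orig.get? (((uN ^^^ mN : Nat)) : Int))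
        else orig.get? ((uN : Nat) : Int)) →
      (pvRelax ((mN : Nat) : Int) items cur).keys.Nodup ∧
      (∀ u : Int, u < 0 → (pvRelax ((mN : Nat) : Int) items cur).get? u = orig.get? u) ∧
      (∀ uN : Nat, (pvRelax ((mN : Nat) : Int) items cur).get? ((uN : Nat) : Int) =
        if (((uN ^^^ mN : Nat)) : Int) ∈ (done ++ items).map Prod.fst
        then pvRlx (orig.get? ((uN : Nat) : Int)) (orig.get? (((uN ^^^ mN : Nat)) : Int))
        else orig.get? ((uN : Nat) : Int)) := by
  intro items
  induction items with
  | nil =>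
    intro done cur hsplit hcnd hcneg hcget
    refine ⟨hcnd, hcneg, fun uN => ?_⟩
    rw [show pvRelax ((mN : Nat) : Int) [] cur = cur from rfl, List.append_nil]
    exact hcget uN
  | cons tc rest ih =>
    intro done cur hsplit hcnd hcneg hcget
    obtain ⟨t, c⟩ := tc
    have hmem : (t, c) ∈ orig.items := by rw [hsplit]; simp
    have hgt : orig.get? t = some c := PySem.Dict.get?_of_mem_items orig hmem hnd
    have ht0 : 0 ≤ t := by
      by_contra h
      rw [hneg t (by omega)] at hgt; cases hgt
    have htN : t = ((t.toNat : Nat) : Int) := by omega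
    have hnt : PySem.Int.bxor t ((mN : Nat) : Int) = (((t.toNat ^^^ mN : Nat)) : Int) := by
      rw [htN]; exact PySem.Int.bxor_natCast t.toNat mN
    have hkeys : orig.keys = done.map Prod.fst ++ (t :: rest.map Prod.fst) := by
      show orig.items.map Prod.fst = _
      rw [hsplit]; simp
    have htdone : (t : Int) ∉ done.map Prod.fst := by
      have h := hkeys ▸ hnd
      rcases List.nodup_append.mp h with ⟨_, _, hdisj⟩
      intro hmem'
      exact hdisj t hmem' t (by simp) rfl
    have hcancel : (t.toNat ^^^ mN) ^^^ mN = t.toNat := pv_xorcancel t.toNat mN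
    have hcurnt : cur.get? (((t.toNat ^^^ mN : Nat)) : Int)
        = orig.get? (((t.toNat ^^^ mN : Nat)) : Int) := by
      have h := hcget (t.toNat ^^^ mN)
      rw [if_neg (by rw [hcancel, ← htN]; exact htdone)] at h
      exact h
    have hred : pvRelax ((mN : Nat) : Int) ((t, c) :: rest) cur
        = if cur.getD (PySem.Int.bxor t ((mN : Nat) : Int)) (c + 1 + 1) > c + 1
          then pvRelax ((mN : Nat) : Int) rest (cur.insert (PySem.Int.bxor t ((mN : Nat) : Int)) (c + 1))
          else pvRelax ((mN : Nat) : Int) rest cur := rfl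
    have hgetD : cur.getD (PySem.Int.bxor t ((mN : Nat) : Int)) (c + 1 + 1)
        = (orig.get? (((t.toNat ^^^ mN : Nat)) : Int)).getD (c + 1 + 1) := by
      rw [hnt, PySem.Dict.getD_eq_get?_getD, hcurnt]
    have hsplit' : orig.items = (done ++ [(t, c)]) ++ rest := by rw [hsplit]; simp
    have hdone' : ∀ uN : Nat,
        ((((uN ^^^ mN : Nat)) : Int) ∈ (done ++ [(t, c)]).map Prod.fst)
          ↔ ((((uN ^^^ mN : Nat)) : Int) ∈ done.map Prod.fst ∨ uN = t.toNat ^^^ mN) := by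
      intro uN
      simp only [List.map_append, List.map_cons, List.map_nil, List.mem_append,
        List.mem_singleton]
      constructor
      · rintro (h | h)
        · exact Or.inl h
        · right
          have : (uN ^^^ mN : Nat) = t.toNat := by
            rw [htN] at h; exact_mod_cast h
          have h2 : (uN ^^^ mN) ^^^ mN = t.toNat ^^^ mN := by rw [this]
          rwa [pv_xorcancel] at h2
      · rintro (h | h)
        · exact Or.inl h
        · subst h; right; rw [hcancel, ← htN]
    rw [hred]
    by_cases hbr : cur.getD (PySem.Int.bxor t ((mN : Nat) : Int)) (c + 1 + 1) > c + 1
    · rw [if_pos hbr]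
      have hres := ih (done ++ [(t, c)]) (cur.insert (PySem.Int.bxor t ((mN : Nat) : Int)) (c + 1))
        hsplit'
        (PySem.Dict.nodup_keys_insert cur _ _ hcnd)
        (by
          intro u hu
          rw [PySem.Dict.get?_insert_of_ne cur (c + 1) (by rw [hnt]; omega)]
          exact hcneg u hu)
        (by
          intro uN
          by_cases huN : uN = t.toNat ^^^ mN
          · subst huN
            rw [hnt, PySem.Dict.get?_insert_self]
            rw [if_pos ((hdone' _).mpr (Or.inr rfl))]
            rw [hcancel, ← htN, hgt]
            rw [hgetD] at hbr
            cases horig : orig.get? (((t.toNat ^^^ mN : Nat)) : Int) with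
            | none => simp [pvRlx]
            | some v =>
              rw [horig] at hbr
              simp only [Option.getD_some] at hbr
              simp only [pvRlx]
              congr 1
              omega
          · rw [PySem.Dict.get?_insert_of_ne cur (c + 1) (by
              rw [hnt]
              intro he
              exact huN (by exact_mod_cast he))]
            rw [hcget uN]
            by_cases hin : (((uN ^^^ mN : Nat)) : Int) ∈ done.map Prod.fst
            · rw [if_pos hin, if_pos ((hdone' uN).mpr (Or.inl hin))]
            · rw [if_neg hin, if_neg (by
                intro hc'
                rcases (hdone' uN).mp hc' with h | h
                · exact hin h
                · exact huN h)])
      refine ⟨hres.1, hres.2.1, ?_⟩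
      intro uN
      have h := hres.2.2 uN
      rwa [show (done ++ [(t, c)]) ++ rest = done ++ ((t, c) :: rest) from by simp] at h
    · rw [if_neg hbr]
      rw [hgetD] at hbr
      have horig : ∃ v, orig.get? (((t.toNat ^^^ mN : Nat)) : Int) = some v ∧ v ≤ c + 1 := by
        cases horig : orig.get? (((t.toNat ^^^ mN : Nat)) : Int) with
        | none =>
          exfalso
          apply hbr
          rw [horig]
          simp only [Option.getD_none]
          omega
        | some v =>
          rw [horig] at hbr
          simp only [Option.getD_some, not_lt] at hbr
          exact ⟨v, rfl, hbr⟩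
      obtain ⟨v, hv, hvle⟩ := horig
      have hres := ih (done ++ [(t, c)]) cur hsplit' hcnd hcneg
        (by
          intro uN
          by_cases huN : uN = t.toNat ^^^ mN
          · subst huN
            rw [hcget (t.toNat ^^^ mN), if_neg (by rw [hcancel, ← htN]; exact htdone)]
            rw [if_pos ((hdone' _).mpr (Or.inr rfl))]
            rw [hcancel, ← htN, hgt, hv]
            simp [pvRlx]
            omega
          · rw [hcget uN]
            by_cases hin : (((uN ^^^ mN : Nat)) : Int) ∈ done.map Prod.fst
            · rw [if_pos hin, if_pos ((hdone' uN).mpr (Or.inl hin))]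
            · rw [if_neg hin, if_neg (by
                intro hc'
                rcases (hdone' uN).mp hc' with h | h
                · exact hin h
                · exact huN h)])
      refine ⟨hres.1, hres.2.1, ?_⟩
      intro uN
      have h := hres.2.2 uN
      rwa [show (done ++ [(t, c)]) ++ rest = done ++ ((t, c) :: rest) from by simp] at h

lemma pv_relax_spec (mN : Nat) (orig : PySem.Dict Int Int)
    (hnd : orig.keys.Nodup) (hneg : ∀ u : Int, u < 0 → orig.get? u = none) :
    (pvRelax ((mN : Nat) : Int) orig.items orig).keys.Nodup ∧
    (∀ u : Int, u < 0 → (pvRelax ((mN : Nat) : Int) orig.items orig).get? u = none) ∧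
    (∀ uN : Nat, (pvRelax ((mN : Nat) : Int) orig.items orig).get? ((uN : Nat) : Int)
      = pvRlx (orig.get? ((uN : Nat) : Int)) (orig.get? (((uN ^^^ mN : Nat)) : Int))) := by
  obtain ⟨h1, h2, h3⟩ := pv_relax_go mN orig hnd hneg orig.items [] orig (by simp) hnd
    (fun _ _ => rfl) (fun uN => by rw [if_neg (by simp)])
  refine ⟨h1, fun u hu => by rw [h2 u hu]; exact hneg u hu, ?_⟩
  intro uN
  have h := h3 uN
  by_cases hin : (((uN ^^^ mN : Nat)) : Int) ∈ ([] ++ orig.items).map Prod.fst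
  · rwa [if_pos hin] at h
  · rw [if_neg hin] at h
    have hnone : orig.get? (((uN ^^^ mN : Nat)) : Int) = none := by
      apply (PySem.Dict.get?_eq_none_iff_not_mem_keys orig _).mpr
      intro hmem
      exact hin (by rw [List.nil_append]; exact hmem)
    rw [h, hnone]
    rfl

def PvBInv (P : List Nat) (d : PySem.Dict Int Int) : Prop :=
  d.keys.Nodup ∧
  (∀ u : Int, u < 0 → d.get? u = none) ∧
  (∀ (tN : Nat) (c : Int), d.get? ((tN : Nat) : Int) = some c →
    ∃ cN : Nat, c = ((cN : Nat) : Int) ∧ SubP P tN cN ∧ ∀ j, SubP P tN j → cN ≤ j) ∧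
  (∀ (tN k : Nat), SubP P tN k → (d.get? ((tN : Nat) : Int)).isSome = true)

lemma pvBInv_init : PvBInv [] (PySem.Dict.empty.insert 0 0) := by
  refine ⟨by decide, ?_, ?_, ?_⟩
  · intro u hu
    rw [PySem.Dict.get?_insert]
    rw [if_neg (by omega)]
    exact PySem.Dict.get?_empty u
  · intro tN c hc
    rw [PySem.Dict.get?_insert] at hc
    by_cases h : ((tN : Nat) : Int) = 0
    · rw [if_pos h] at hc
      have htN : tN = 0 := by exact_mod_cast h
      subst htN
      refine ⟨0, by simpa using hc.symm, subP_zero [], fun j _ => Nat.zero_le j⟩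
    · rw [if_neg h] at hc
      rw [PySem.Dict.get?_empty] at hc
      cases hc
  · intro tN k hsub
    obtain ⟨S, hS, hlen, hx⟩ := hsub
    have hS0 : S = [] := List.sublist_nil.mp hS
    subst hS0
    have htN : tN = 0 := by simpa [pvXorN] using hx.symm
    subst htN
    simp [PySem.Dict.get?_insert]

lemma pvBInv_step (P : List Nat) (mN : Nat) (d : PySem.Dict Int Int)
    (H : PvBInv P d) : PvBInv (P ++ [mN]) (pvRelax ((mN : Nat) : Int) d.items d) := by
  obtain ⟨hnd, hneg, hsound, hcomp⟩ := H
  obtain ⟨h1, h2, h3⟩ := pv_relax_spec mN d hnd hneg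
  refine ⟨h1, h2, ?_, ?_⟩
  · -- soundness + minimality
    intro tN c hc
    rw [h3 tN] at hc
    cases hsrc : d.get? (((tN ^^^ mN : Nat)) : Int) with
    | none =>
      rw [hsrc] at hc
      have hc' : d.get? ((tN : Nat) : Int) = some c := hc
      obtain ⟨cN, rfl, hSub, hmin⟩ := hsound tN c hc'
      refine ⟨cN, rfl, subP_append.mpr (Or.inl hSub), ?_⟩
      intro j hj
      rcases subP_append.mp hj with hj' | ⟨k', rfl, hj'⟩
      · exact hmin j hj'
      · have := hcomp _ k' hj'
        rw [hsrc] at this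
        cases this
    | some c0 =>
      rw [hsrc] at hc
      obtain ⟨c0N, rfl, hSub0, hmin0⟩ := hsound _ c0 hsrc
      cases hor : d.get? ((tN : Nat) : Int) with
      | none =>
        rw [hor] at hc
        simp only [pvRlx] at hc
        have hcv : c = ((c0N : Nat) : Int) + 1 := by cases hc; rfl
        refine ⟨c0N + 1, by push_cast [hcv]; ring, subP_append.mpr (Or.inr ⟨c0N, rfl, hSub0⟩), ?_⟩
        intro j hj
        rcases subP_append.mp hj with hj' | ⟨k', rfl, hj'⟩
        · have := hcomp tN j hj'
          rw [hor] at this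
          cases this
        · have := hmin0 k' hj'
          omega
      | some v =>
        rw [hor] at hc
        simp only [pvRlx] at hc
        obtain ⟨vN, rfl, hSubv, hminv⟩ := hsound tN v hor
        have hcv : c = min ((vN : Nat) : Int) (((c0N : Nat) : Int) + 1) := by cases hc; rfl
        refine ⟨min vN (c0N + 1), by push_cast [hcv]; omega, ?_, ?_⟩
        · rcases le_total vN (c0N + 1) with hle | hle
          · rw [min_eq_left hle]
            exact subP_append.mpr (Or.inl hSubv)
          · rw [min_eq_right hle]
            exact subP_append.mpr (Or.inr ⟨c0N, rfl, hSub0⟩)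
        · intro j hj
          rcases subP_append.mp hj with hj' | ⟨k', rfl, hj'⟩
          · have := hminv j hj'
            omega
          · have := hmin0 k' hj'
            omega
  · -- completeness
    intro tN k hsub
    rw [h3 tN]
    rcases subP_append.mp hsub with h | ⟨k', rfl, h⟩
    · have := hcomp tN k h
      cases hg : d.get? ((tN : Nat) : Int) with
      | none => rw [hg] at this; cases this
      | some v =>
        cases d.get? (((tN ^^^ mN : Nat)) : Int) <;> simp [pvRlx]
    · have := hcomp _ k' h
      cases hg : d.get? (((tN ^^^ mN : Nat)) : Int) with
      | none => rw [hg] at this; cases this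
      | some c0 =>
        cases d.get? ((tN : Nat) : Int) <;> simp [pvRlx]

lemma pvBInv_fold (PN : List Nat) : ∀ (P : List Nat) (d : PySem.Dict Int Int),
    PvBInv P d →
    PvBInv (P ++ PN) (PN.foldl (fun b p => pvRelax ((p : Nat) : Int) b.items b) d) := by
  induction PN with
  | nil => intro P d H; simpa using H
  | cons p rest ih =>
    intro P d H
    have h1 := pvBInv_step P p d H
    have h2 := ih (P ++ [p]) _ h1
    rw [show (P ++ [p]) ++ rest = P ++ (p :: rest) from by simp] at h2
    simpa using h2

/-! ### A side: invariants for the breadth-first search -/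

def pvMval (dist : List Int) (u : Nat) : Int := dist.getD u (-1)

def pvMC (dist : List Int) : Nat := dist.countP (fun x => x != -1)

lemma pvMval_set {dist : List Int} {v : Nat} (d : Int) (u : Nat) (hv : v < dist.length) :
    pvMval (dist.set v d) u = if u = v then d else pvMval dist u := by
  unfold pvMval
  rw [List.getD_eq_getElem?_getD, List.getD_eq_getElem?_getD, List.getElem?_set]
  by_cases h : u = v
  · subst h; rw [if_pos rfl, if_pos rfl, if_pos hv]; rfl
  · rw [if_neg (fun he => h he.symm), if_neg h]

lemma pvMC_set_new {dist : List Int} {v : Nat} {d : Int} (hv : v < dist.length)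
    (hunm : pvMval dist v = -1) (hd : d ≠ -1) : pvMC (dist.set v d) = pvMC dist + 1 := by
  unfold pvMC
  rw [List.countP_set hv]
  have hgv : dist[v] = -1 := by
    unfold pvMval at hunm
    rw [List.getD_eq_getElem?_getD, List.getElem?_eq_getElem hv] at hunm
    simpa using hunm
  simp [hgv, hd]

lemma pvMC_le (dist : List Int) : pvMC dist ≤ dist.length := List.countP_le_length

lemma pvMval_getD0 {dist : List Int} {u : Nat} (h : u < dist.length) :
    dist.getD u 0 = pvMval dist u := by
  unfold pvMval
  rw [List.getD_eq_getElem?_getD, List.getD_eq_getElem?_getD, List.getElem?_eq_getElem h]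
  rfl

/-- invariant at the top of A's `while q` loop -/
structure PvA (nn : Nat) (PN : List Nat) (tgtN : Nat)
    (dist : List Int) (qN : List Nat) (fuel : Nat) : Prop where
  hlen : dist.length = 2^nn
  hq : ∀ u ∈ qN, u < 2^nn ∧ pvMval dist u ≠ -1
  hm0 : pvMval dist 0 ≠ -1
  htgt : pvMval dist tgtN = -1
  hcor : ∀ u, u < 2^nn → pvMval dist u = -1 ∨
    ∃ k : Nat, pvMval dist u = ((k : Nat) : Int) ∧ SeqP PN u k ∧ ∀ j, SeqP PN u j → k ≤ j
  hpair : qN.Pairwise (fun u v => pvMval dist u ≤ pvMval dist v)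
  hband2 : ∀ u ∈ qN, ∀ v ∈ qN, pvMval dist v ≤ pvMval dist u + 1
  hclosed : ∀ u, u < 2^nn → pvMval dist u ≠ -1 → u ∉ qN →
    ∀ m ∈ PN, pvMval dist (u ^^^ m) ≠ -1 ∧ u ^^^ m ≠ tgtN
  hreach : ∀ u, u < 2^nn → ∀ k, SeqP PN u k →
    pvMval dist u ≠ -1 ∨ ∃ w ∈ qN, pvMval dist w ≤ ((k : Nat) : Int)
  hnd : qN.Nodup
  hfuel : qN.length + 2^nn ≤ fuel + pvMC dist

/-- invariant during the expansion of the popped state `s` (`done` = masks already tried) -/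
structure PvMid (nn : Nat) (PN : List Nat) (tgtN : Nat) (s lev : Nat) (done : List Nat)
    (dist : List Int) (qN : List Nat) : Prop where
  hlen : dist.length = 2^nn
  hq : ∀ u ∈ qN, u < 2^nn ∧ pvMval dist u ≠ -1
  hm0 : pvMval dist 0 ≠ -1
  htgt : pvMval dist tgtN = -1
  hcor : ∀ u, u < 2^nn → pvMval dist u = -1 ∨
    ∃ k : Nat, pvMval dist u = ((k : Nat) : Int) ∧ SeqP PN u k ∧ ∀ j, SeqP PN u j → k ≤ j
  hpair : qN.Pairwise (fun u v => pvMval dist u ≤ pvMval dist v)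
  hband : ∀ u ∈ qN, ((lev : Nat) : Int) ≤ pvMval dist u ∧ pvMval dist u ≤ ((lev : Nat) : Int) + 1
  hclosed : ∀ u, u < 2^nn → pvMval dist u ≠ -1 → u ∉ qN → u ≠ s →
    ∀ m ∈ PN, pvMval dist (u ^^^ m) ≠ -1 ∧ u ^^^ m ≠ tgtN
  hsdone : ∀ m ∈ done, pvMval dist (s ^^^ m) ≠ -1 ∧ s ^^^ m ≠ tgtN
  hreachlt : ∀ u, u < 2^nn → ∀ k, SeqP PN u k → k < lev → pvMval dist u ≠ -1
  hs : s < 2^nn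
  hsv : pvMval dist s = ((lev : Nat) : Int)
  hsq : s ∉ qN
  hnd : qN.Nodup

/-- a freshly generated state at level `lev + 1` really has BFS distance `lev + 1`:
    nothing closer than the current level is unmarked -/
lemma pv_min_new {nn : Nat} {PN : List Nat} {tgtN s lev : Nat} {done : List Nat}
    {dist : List Int} {qN : List Nat}
    (HP : ∀ p ∈ PN, 0 < p ∧ p < 2^nn)
    (H : PvMid nn PN tgtN s lev done dist qN) {v : Nat} (hvlt : v < 2^nn)
    (hunm : pvMval dist v = -1) : ∀ j, SeqP PN v j → lev + 1 ≤ j := by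
  intro j hj
  by_contra hlt
  push_neg at hlt
  cases j with
  | zero =>
    have hv0 : v = 0 := seqP_eq_zero hj
    subst hv0
    exact H.hm0 hunm
  | succ j' =>
    obtain ⟨m', hm', hpre⟩ := seqP_pred hj
    have hplt : v ^^^ m' < 2^nn := Nat.xor_lt_two_pow hvlt (HP m' hm').2
    have hj'lev : j' < lev := by omega
    have hpm : pvMval dist (v ^^^ m') ≠ -1 := H.hreachlt _ hplt j' hpre hj'lev
    obtain ⟨kp, hkpv, hkseq, hkmin⟩ := (H.hcor _ hplt).resolve_left (fun h => hpm h)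
    have hkle : kp ≤ j' := hkmin j' hpre
    have hnotq : (v ^^^ m') ∉ qN := by
      intro hin
      have hb := (H.hband _ hin).1
      rw [hkpv] at hb
      omega
    have hnes : (v ^^^ m') ≠ s := by
      intro he
      rw [he, H.hsv] at hkpv
      have : lev = kp := by exact_mod_cast hkpv
      omega
    have hcl := (H.hclosed _ hplt hpm hnotq hnes m' hm').1
    rw [pv_xorcancel] at hcl
    exact hcl hunm

/-- one full pass of A's inner `for m in masks` loop, by induction over the remaining masks -/
lemma pv_step_spec (nn : Nat) (PN : List Nat) (tgtN : Nat)
    (HP : ∀ p ∈ PN, 0 < p ∧ p < 2^nn) :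
    ∀ (rem done : List Nat) (dist : List Int) (qN : List Nat) (s lev : Nat),
      PN = done ++ rem →
      PvMid nn PN tgtN s lev done dist qN →
      (∃ d1 q1, pvStep ((tgtN : Nat) : Int) ((s : Nat) : Int) (((lev : Nat) : Int) + 1)
            (rem.map (fun p => ((p : Nat) : Int))) dist (qN.map (fun u => ((u : Nat) : Int)))
            = (some (((lev : Nat) : Int) + 1), d1, q1)
          ∧ SeqP PN tgtN (lev + 1) ∧ ∀ j, SeqP PN tgtN j → lev + 1 ≤ j)
      ∨ (∃ dist' qN', pvStep ((tgtN : Nat) : Int) ((s : Nat) : Int) (((lev : Nat) : Int) + 1)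
            (rem.map (fun p => ((p : Nat) : Int))) dist (qN.map (fun u => ((u : Nat) : Int)))
            = (none, dist', qN'.map (fun u => ((u : Nat) : Int)))
          ∧ PvMid nn PN tgtN s lev PN dist' qN'
          ∧ qN'.length + pvMC dist = qN.length + pvMC dist') := by
  intro rem
  induction rem with
  | nil =>
    intro done dist qN s lev hsplit H
    rw [List.append_nil] at hsplit
    subst hsplit
    right
    exact ⟨dist, qN, by simp [pvStep], H, rfl⟩
  | cons m rem' ih =>
    intro done dist qN s lev hsplit H
    have hmPN : m ∈ PN := by rw [hsplit]; simp
    have hmlt := (HP m hmPN).2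
    have hns : PySem.Int.bxor ((s : Nat) : Int) ((m : Nat) : Int) = (((s ^^^ m : Nat)) : Int) :=
      PySem.Int.bxor_natCast s m
    have hnslt : s ^^^ m < 2^nn := Nat.xor_lt_two_pow H.hs hmlt
    have hlen := H.hlen
    have hg : PySem.List.pyGetD dist (((s ^^^ m : Nat)) : Int) 0 = pvMval dist (s ^^^ m) := by
      rw [PySem.List.pyGetD_natCast]
      exact pvMval_getD0 (by omega)
    have hred : pvStep ((tgtN : Nat) : Int) ((s : Nat) : Int) (((lev : Nat) : Int) + 1)
          ((m :: rem').map (fun p => ((p : Nat) : Int))) dist (qN.map (fun u => ((u : Nat) : Int)))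
        = if PySem.List.pyGetD dist (PySem.Int.bxor ((s : Nat) : Int) ((m : Nat) : Int)) 0 = -1 then
            if PySem.Int.bxor ((s : Nat) : Int) ((m : Nat) : Int) = ((tgtN : Nat) : Int) then
              (some (((lev : Nat) : Int) + 1), dist, qN.map (fun u => ((u : Nat) : Int)))
            else
              pvStep ((tgtN : Nat) : Int) ((s : Nat) : Int) (((lev : Nat) : Int) + 1)
                (rem'.map (fun p => ((p : Nat) : Int)))
                (PySem.List.pySetD dist (PySem.Int.bxor ((s : Nat) : Int) ((m : Nat) : Int)) (((lev : Nat) : Int) + 1))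
                (qN.map (fun u => ((u : Nat) : Int)) ++ [PySem.Int.bxor ((s : Nat) : Int) ((m : Nat) : Int)])
          else
            pvStep ((tgtN : Nat) : Int) ((s : Nat) : Int) (((lev : Nat) : Int) + 1)
              (rem'.map (fun p => ((p : Nat) : Int))) dist (qN.map (fun u => ((u : Nat) : Int))) := rfl
    rw [hred, hns, hg]
    have hsplit' : PN = (done ++ [m]) ++ rem' := by rw [hsplit]; simp
    by_cases hmk : pvMval dist (s ^^^ m) = -1
    · rw [if_pos hmk]
      -- distance facts about s
      obtain ⟨ks, hksv, hkseq, hksmin⟩ := (H.hcor s H.hs).resolve_left (by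
        rw [H.hsv]; intro hcontra; omega)
      have hkslev : ks = lev := by
        rw [H.hsv] at hksv
        exact_mod_cast hksv.symm
      rw [hkslev] at hkseq
      have hseqns : SeqP PN (s ^^^ m) (lev + 1) := seqP_step hkseq hmPN
      have hminns : ∀ j, SeqP PN (s ^^^ m) j → lev + 1 ≤ j := pv_min_new HP H hnslt hmk
      by_cases htg : s ^^^ m = tgtN
      · rw [if_pos (by exact_mod_cast htg)]
        left
        exact ⟨_, _, rfl, htg ▸ hseqns, htg ▸ hminns⟩
      · rw [if_neg (by
          intro he
          exact htg (by exact_mod_cast he))]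
        rw [PySem.List.pySetD_natCast]
        set d' := dist.set (s ^^^ m) (((lev : Nat) : Int) + 1) with hd'
        have hnsd : s ^^^ m < dist.length := by omega
        have hmono : ∀ x, pvMval dist x ≠ -1 → pvMval d' x = pvMval dist x := by
          intro x hx
          rw [hd', pvMval_set _ _ hnsd]
          rw [if_neg (by
            intro he
            rw [he] at hx
            exact hx hmk)]
        have hmval' : ∀ x, pvMval d' x = if x = s ^^^ m then ((lev : Nat) : Int) + 1 else pvMval dist x := by
          intro x
          rw [hd', pvMval_set _ _ hnsd]
        have hnsnotq : (s ^^^ m) ∉ qN := by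
          intro hin
          exact (H.hq _ hin).2 hmk
        have Hmid' : PvMid nn PN tgtN s lev (done ++ [m]) d' (qN ++ [s ^^^ m]) := by
          refine ⟨by simp [hd', hlen], ?_, ?_, ?_, ?_, ?_, ?_, ?_, ?_, ?_, H.hs, ?_, ?_, ?_⟩
          · intro u hu
            rcases List.mem_append.mp hu with hu' | hu'
            · obtain ⟨h1, h2⟩ := H.hq u hu'
              exact ⟨h1, by rw [hmono u h2]; exact h2⟩
            · simp at hu'
              subst hu'
              refine ⟨hnslt, ?_⟩
              rw [hmval', if_pos rfl]
              omega
          · rw [hmono 0 H.hm0]; exact H.hm0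
          · rw [hmval', if_neg (fun he => htg he.symm)]
            exact H.htgt
          · intro u hu
            by_cases hue : u = s ^^^ m
            · subst hue
              right
              refine ⟨lev + 1, by rw [hmval', if_pos rfl]; push_cast; ring, hseqns, hminns⟩
            · rw [hmval', if_neg hue]
              exact H.hcor u hu
          · rw [List.pairwise_append]
            refine ⟨H.hpair.imp_of_mem (fun {a b} ha hb hab => ?_), by simp, ?_⟩
            · rw [hmono a (H.hq a ha).2, hmono b (H.hq b hb).2]
              exact hab
            · intro a ha b hb
              simp at hb
              subst hb
              rw [hmono a (H.hq a ha).2, hmval', if_pos rfl]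
              exact (H.hband a ha).2
          · intro u hu
            rcases List.mem_append.mp hu with hu' | hu'
            · rw [hmono u (H.hq u hu').2]
              exact H.hband u hu'
            · simp at hu'
              subst hu'
              rw [hmval', if_pos rfl]
              omega
          · intro u hult hum hunq hus m'' hm''
            have hune : u ≠ s ^^^ m := by
              intro he
              exact hunq (by rw [he]; simp)
            rw [hmval' u, if_neg hune] at hum
            have hcl := H.hclosed u hult hum (fun hin => hunq (by simp [hin])) hus m'' hm''
            refine ⟨by rw [hmono _ hcl.1]; exact hcl.1, hcl.2⟩
          · intro m'' hm''
            rcases List.mem_append.mp hm'' with hm' | hm'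
            · have hcl := H.hsdone m'' hm'
              exact ⟨by rw [hmono _ hcl.1]; exact hcl.1, hcl.2⟩
            · simp at hm'
              subst hm'
              refine ⟨by rw [hmval', if_pos rfl]; omega, htg⟩
          · intro u hult k hk hklt
            have h := H.hreachlt u hult k hk hklt
            rw [hmono u h]
            exact h
          · rw [hmono s (by rw [H.hsv]; intro hcontra; omega)]
            exact H.hsv
          · intro hin
            rcases List.mem_append.mp hin with hin' | hin'
            · exact H.hsq hin'
            · simp at hin'
              have hcontra : pvMval dist s = -1 := by rw [hin']; exact hmk
              rw [H.hsv] at hcontra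
              omega
          · rw [List.nodup_append]
            refine ⟨H.hnd, by simp, ?_⟩
            intro a ha b hb
            simp at hb
            subst hb
            intro he
            rw [he] at ha
            exact hnsnotq ha
        have hres := ih (done ++ [m]) d' (qN ++ [s ^^^ m]) s lev hsplit' Hmid'
        have hcount : pvMC d' = pvMC dist + 1 := pvMC_set_new hnsd hmk (by omega)
        rw [List.map_append] at hres
        rcases hres with ⟨d1, q1, heq, h1, h2⟩ | ⟨dist'', qN'', heq, Hf, hcnt⟩
        · left
          exact ⟨d1, q1, heq, h1, h2⟩
        · right
          refine ⟨dist'', qN'', heq, Hf, ?_⟩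
          simp at hcnt
          omega
    · rw [if_neg hmk]
      have Hmid' : PvMid nn PN tgtN s lev (done ++ [m]) dist qN := by
        refine ⟨H.hlen, H.hq, H.hm0, H.htgt, H.hcor, H.hpair, H.hband, H.hclosed, ?_,
          H.hreachlt, H.hs, H.hsv, H.hsq, H.hnd⟩
        intro m'' hm''
        rcases List.mem_append.mp hm'' with hm' | hm'
        · exact H.hsdone m'' hm'
        · simp at hm'
          subst hm'
          refine ⟨hmk, ?_⟩
          intro he
          rw [he] at hmk
          exact hmk H.htgt
      exact ih (done ++ [m]) dist qN s lev hsplit' Hmid'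

/-- the outer `while q` loop: with the invariant, A returns the minimal press count
    reaching the target, and 0 when the target is unreachable -/
lemma pv_bfs_spec (nn : Nat) (PN : List Nat) (tgtN : Nat)
    (HP : ∀ p ∈ PN, 0 < p ∧ p < 2^nn) (htlt : tgtN < 2^nn) :
    ∀ (fuel : Nat) (dist : List Int) (qN : List Nat),
      PvA nn PN tgtN dist qN fuel →
      ((∀ k, ¬ SeqP PN tgtN k) →
        pvBFS ((tgtN : Nat) : Int) (PN.map (fun p => ((p : Nat) : Int))) fuel dist
          (qN.map (fun u => ((u : Nat) : Int))) = 0)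
      ∧ (∀ k, SeqP PN tgtN k → (∀ j, SeqP PN tgtN j → k ≤ j) →
        pvBFS ((tgtN : Nat) : Int) (PN.map (fun p => ((p : Nat) : Int))) fuel dist
          (qN.map (fun u => ((u : Nat) : Int))) = ((k : Nat) : Int)) := by
  have hempty : ∀ (dist : List Int),
      (∀ u, u < 2^nn → pvMval dist u ≠ -1 → ∀ m ∈ PN, pvMval dist (u ^^^ m) ≠ -1 ∧ u ^^^ m ≠ tgtN) →
      pvMval dist 0 ≠ -1 →
      ∀ k u, u < 2^nn → SeqP PN u k → pvMval dist u ≠ -1 := by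
    intro dist hcl hm0 k
    induction k with
    | zero =>
      intro u _ hk
      have : u = 0 := seqP_eq_zero hk
      subst this
      exact hm0
    | succ k ihk =>
      intro u hu hk
      obtain ⟨m', hm', hpre⟩ := seqP_pred hk
      have hplt : u ^^^ m' < 2^nn := Nat.xor_lt_two_pow hu (HP m' hm').2
      have hpm := ihk (u ^^^ m') hplt hpre
      have := (hcl _ hplt hpm m' hm').1
      rwa [pv_xorcancel] at this
  intro fuel
  induction fuel with
  | zero =>
    intro dist qN H
    have hq0 : qN = [] := by
      have h1 := H.hfuel
      have h2 : pvMC dist ≤ 2^nn := H.hlen ▸ pvMC_le dist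
      exact List.length_eq_zero_iff.mp (by omega)
    subst hq0
    constructor
    · intro _; rfl
    · intro k hk _
      exact absurd (hempty dist (fun u h1 h2 => H.hclosed u h1 h2 (by simp)) H.hm0 k tgtN htlt hk)
        (fun h => h H.htgt)
  | succ fuel ihf =>
    intro dist qN H
    cases qN with
    | nil =>
      constructor
      · intro _; rfl
      · intro k hk _
        exact absurd (hempty dist (fun u h1 h2 => H.hclosed u h1 h2 (by simp)) H.hm0 k tgtN htlt hk)
          (fun h => h H.htgt)
    | cons s rest =>
      obtain ⟨hslt, hsm⟩ := H.hq s (by simp)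
      obtain ⟨lev, hlev, hseqs, hmins⟩ := (H.hcor s hslt).resolve_left (fun h => hsm h)
      have hd : PySem.List.pyGetD dist ((s : Nat) : Int) 0 + 1 = ((lev : Nat) : Int) + 1 := by
        rw [PySem.List.pyGetD_natCast, pvMval_getD0 (by rw [H.hlen]; exact hslt), hlev]
      have hpairrest := List.pairwise_cons.mp H.hpair
      have hndrest := List.nodup_cons.mp H.hnd
      have Hmid : PvMid nn PN tgtN s lev [] dist rest := by
        refine ⟨H.hlen, fun u hu => H.hq u (by simp [hu]), H.hm0, H.htgt, H.hcor,
          hpairrest.2, ?_, ?_, by simp, ?_, hslt, hlev, hndrest.1, hndrest.2⟩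
        · intro u hu
          constructor
          · rw [← hlev]; exact hpairrest.1 u hu
          · rw [← hlev]; exact H.hband2 s (by simp) u (by simp [hu])
        · intro u h1 h2 h3 h4 m hm
          exact H.hclosed u h1 h2 (by simp [h4, h3]) m hm
        · intro u hu k hk hklt
          rcases H.hreach u hu k hk with h | ⟨w, hw, hwle⟩
          · exact h
          · exfalso
            have hwge : ((lev : Nat) : Int) ≤ pvMval dist w := by
              rcases List.mem_cons.mp hw with rfl | hw'
              · rw [hlev]
              · rw [← hlev]; exact hpairrest.1 w hw'
            omega
      rcases pv_step_spec nn PN tgtN HP PN [] dist rest s lev (by simp) Hmid with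
        ⟨d1, q1, hstep, hseqt, hmint⟩ | ⟨dist', qN', hstep, Hmid', hcount⟩
      · constructor
        · intro hnone
          exact absurd hseqt (hnone _)
        · intro k hk hmin
          have hkval : k = lev + 1 := le_antisymm (hmin _ hseqt) (hmint k hk)
          subst hkval
          rw [List.map_cons]
          rw [show pvBFS ((tgtN : Nat) : Int) (PN.map (fun p => ((p : Nat) : Int))) (fuel + 1) dist
              (((s : Nat) : Int) :: rest.map (fun u => ((u : Nat) : Int)))
              = (match pvStep ((tgtN : Nat) : Int) ((s : Nat) : Int)
                  (PySem.List.pyGetD dist ((s : Nat) : Int) 0 + 1)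
                  (PN.map (fun p => ((p : Nat) : Int))) dist (rest.map (fun u => ((u : Nat) : Int))) with
                | (some r, _, _) => r
                | (none, dist', q'') => pvBFS ((tgtN : Nat) : Int) (PN.map (fun p => ((p : Nat) : Int))) fuel dist' q'') from rfl]
          rw [hd, hstep]
          show ((lev : Nat) : Int) + 1 = (((lev + 1 : Nat)) : Int)
          push_cast
          ring
      · have HA' : PvA nn PN tgtN dist' qN' fuel := by
          refine ⟨Hmid'.hlen, Hmid'.hq, Hmid'.hm0, Hmid'.htgt, Hmid'.hcor, Hmid'.hpair,
            ?_, ?_, ?_, Hmid'.hnd, ?_⟩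
          · intro u hu v hv
            have h1 := Hmid'.hband u hu
            have h2 := Hmid'.hband v hv
            omega
          · intro u h1 h2 h3 m hm
            by_cases hus : u = s
            · subst hus
              exact Hmid'.hsdone m hm
            · exact Hmid'.hclosed u h1 h2 h3 hus m hm
          · have hre : ∀ k u, u < 2^nn → SeqP PN u k →
                pvMval dist' u ≠ -1 ∨ ∃ w ∈ qN', pvMval dist' w ≤ ((k : Nat) : Int) := by
              intro k
              induction k with
              | zero =>
                intro u _ hk
                left
                have : u = 0 := seqP_eq_zero hk
                subst this
                exact Hmid'.hm0
              | succ k ihk =>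
                intro u hu hk
                by_cases hmku : pvMval dist' u = -1
                · obtain ⟨m', hm', hpre⟩ := seqP_pred hk
                  have hplt : u ^^^ m' < 2^nn := Nat.xor_lt_two_pow hu (HP m' hm').2
                  rcases ihk (u ^^^ m') hplt hpre with hp | ⟨w, hw, hwle⟩
                  · by_cases hpq : (u ^^^ m') ∈ qN'
                    · right
                      refine ⟨u ^^^ m', hpq, ?_⟩
                      obtain ⟨kp, hkpv, _, hkmin⟩ := (Hmid'.hcor _ hplt).resolve_left (fun h => hp h)
                      have := hkmin k hpre
                      rw [hkpv]
                      push_cast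
                      omega
                    · exfalso
                      by_cases hps : (u ^^^ m') = s
                      · have := (Hmid'.hsdone m' hm').1
                        rw [← hps, pv_xorcancel] at this
                        exact this hmku
                      · have := (Hmid'.hclosed _ hplt hp hpq hps m' hm').1
                        rw [pv_xorcancel] at this
                        exact this hmku
                  · right
                    refine ⟨w, hw, ?_⟩
                    push_cast at hwle ⊢
                    omega
                · left; exact hmku
            exact fun u hu k hk => hre k u hu hk
          · have h1 := H.hfuel
            simp at h1
            omega
        have hres := ihf dist' qN' HA'
        have hstepeq : pvBFS ((tgtN : Nat) : Int) (PN.map (fun p => ((p : Nat) : Int))) (fuel + 1) dist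
            (((s : Nat) : Int) :: rest.map (fun u => ((u : Nat) : Int)))
            = pvBFS ((tgtN : Nat) : Int) (PN.map (fun p => ((p : Nat) : Int))) fuel dist'
              (qN'.map (fun u => ((u : Nat) : Int))) := by
          rw [show pvBFS ((tgtN : Nat) : Int) (PN.map (fun p => ((p : Nat) : Int))) (fuel + 1) dist
              (((s : Nat) : Int) :: rest.map (fun u => ((u : Nat) : Int)))
              = (match pvStep ((tgtN : Nat) : Int) ((s : Nat) : Int)
                  (PySem.List.pyGetD dist ((s : Nat) : Int) 0 + 1)
                  (PN.map (fun p => ((p : Nat) : Int))) dist (rest.map (fun u => ((u : Nat) : Int))) with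
                | (some r, _, _) => r
                | (none, dist', q'') => pvBFS ((tgtN : Nat) : Int) (PN.map (fun p => ((p : Nat) : Int))) fuel dist' q'') from rfl]
          rw [hd, hstep]
        constructor
        · intro hnone
          rw [show (s :: rest).map (fun u => ((u : Nat) : Int))
              = ((s : Nat) : Int) :: rest.map (fun u => ((u : Nat) : Int)) from rfl]
          rw [hstepeq]
          exact hres.1 hnone
        · intro k hk hmin
          rw [show (s :: rest).map (fun u => ((u : Nat) : Int))
              = ((s : Nat) : Int) :: rest.map (fun u => ((u : Nat) : Int)) from rfl]
          rw [hstepeq]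
          exact hres.2 k hk hmin

/-! ### Assembly: both ports compute the minimal number of presses -/

theorem pv_main (pat : String) (btns : List (List Int)) :
    min_lights pat btns = min_lights_alt pat btns := by
  obtain ⟨tgtN, htgt, htlt⟩ := pvTgt_cast pat
  obtain ⟨PN, HP, hmasks, hfoldB⟩ :=
    pv_folds pat.toList.length btns [] (PySem.Dict.empty.insert 0 0)
  have hBinv : PvBInv PN (PN.foldl (fun b p => pvRelax ((p : Nat) : Int) b.items b)
      (PySem.Dict.empty.insert 0 0)) := by
    have h := pvBInv_fold PN [] (PySem.Dict.empty.insert 0 0) pvBInv_init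
    simpa using h
  have hlenpat : PySem.Str.len pat = ((pat.toList.length : Nat) : Int) := by simp [pysem]
  obtain ⟨hknd, hkneg, hsound, hcomp⟩ := hBinv
  by_cases h0 : tgtN = 0
  · subst h0
    have hA : min_lights pat btns = 0 := by
      simp only [min_lights]
      rw [hlenpat, htgt, if_pos (by norm_num)]
    have hB : min_lights_alt pat btns = 0 := by
      simp only [min_lights_alt]
      rw [htgt, if_pos (by norm_num)]
    rw [hA, hB]
  · have hBval : min_lights_alt pat btns =
        (match (PN.foldl (fun b p => pvRelax ((p : Nat) : Int) b.items b)
            (PySem.Dict.empty.insert 0 0)).get? ((tgtN : Nat) : Int) with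
          | some r => r
          | none => 0) := by
      simp only [min_lights_alt]
      rw [hlenpat, htgt, if_neg (by
        intro he
        exact h0 (by exact_mod_cast he)), hfoldB]
    rw [hBval]
    -- target nonzero: A runs the BFS
    have ht0 : 0 < tgtN := Nat.pos_of_ne_zero h0
    simp only [min_lights]
    rw [hlenpat, htgt, if_neg (by
      intro he
      exact h0 (by exact_mod_cast he))]
    rw [hmasks, List.nil_append]
    rw [Int.toNat_natCast, pv_one_shiftLeft, PySem.List.pyRepeat_singleton,
      Int.toNat_natCast]
    rw [show PySem.List.pySetD (List.replicate (2 ^ pat.toList.length) (-1 : Int)) 0 0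
        = (List.replicate (2 ^ pat.toList.length) (-1 : Int)).set 0 0 from by
      rw [show (0 : Int) = ((0 : Nat) : Int) from rfl, PySem.List.pySetD_natCast]]
    rw [show ([(0 : Int)] : List Int) = ([0] : List Nat).map (fun u => ((u : Nat) : Int)) from by simp]
    set nn := pat.toList.length with hnn
    set dist0 := (List.replicate (2^nn) (-1 : Int)).set 0 0 with hdist0
    have hrep : ∀ u, pvMval (List.replicate (2^nn) (-1 : Int)) u = -1 := by
      intro u
      unfold pvMval
      rw [List.getD_eq_getElem?_getD]
      rcases lt_or_ge u (2^nn) with h | h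
      · simp [List.getElem?_replicate, h]
      · rw [List.getElem?_eq_none (by simpa using h)]
        rfl
    have hlen0 : dist0.length = 2^nn := by simp [hdist0]
    have h0len : 0 < (List.replicate (2^nn) (-1 : Int)).length := by
      simp [Nat.two_pow_pos]
    have hmv : ∀ u, pvMval dist0 u = if u = 0 then 0 else -1 := by
      intro u
      rw [hdist0, pvMval_set _ _ h0len]
      by_cases h : u = 0
      · simp [h]
      · simp [h, hrep u]
    have hmc : pvMC dist0 = 1 := by
      rw [hdist0, pvMC_set_new h0len (hrep 0) (by norm_num)]
      have : pvMC (List.replicate (2^nn) (-1 : Int)) = 0 := by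
        unfold pvMC
        simp [List.countP_replicate]
      omega
    have HA0 : PvA nn PN tgtN dist0 [0] (2^nn) := by
      refine ⟨hlen0, ?_, ?_, ?_, ?_, by simp, ?_, ?_, ?_, by simp, ?_⟩
      · intro u hu
        simp at hu
        subst hu
        refine ⟨Nat.two_pow_pos nn, ?_⟩
        rw [hmv, if_pos rfl]
        norm_num
      · rw [hmv, if_pos rfl]; norm_num
      · rw [hmv, if_neg h0]
      · intro u _
        by_cases h : u = 0
        · subst h
          right
          exact ⟨0, by rw [hmv, if_pos rfl]; simp, seqP_zero PN, fun j _ => Nat.zero_le j⟩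
        · left
          rw [hmv, if_neg h]
      · intro u hu v hv
        simp at hu hv
        subst hu; subst hv
        rw [hmv, if_pos rfl]
        omega
      · intro u _ hmk hnq
        by_cases h : u = 0
        · subst h
          exact absurd (by simp : (0:Nat) ∈ [(0:Nat)]) hnq
        · rw [hmv, if_neg h] at hmk
          exact absurd rfl hmk
      · intro u _ k _
        right
        refine ⟨0, by simp, ?_⟩
        rw [hmv, if_pos rfl]
        positivity
      · simp only [List.length_singleton, hmc]
        omega
    have hbfs := pv_bfs_spec nn PN tgtN HP htlt (2^nn) dist0 [0] HA0
    by_cases hex : ∃ k, SeqP PN tgtN k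
    · obtain ⟨k0, hk0, hmin0⟩ := pv_exists_minimal hex
      rw [hbfs.2 k0 hk0 hmin0]
      obtain ⟨j, hjle, hsubj⟩ := seqP_subP hk0
      have hs := hcomp tgtN j hsubj
      cases hg : (PN.foldl (fun b p => pvRelax ((p : Nat) : Int) b.items b)
          (PySem.Dict.empty.insert 0 0)).get? ((tgtN : Nat) : Int) with
      | none => rw [hg] at hs; cases hs
      | some c =>
        obtain ⟨cN, rfl, hsubc, hminc⟩ := hsound tgtN c hg
        have h1 : cN ≤ j := hminc j hsubj
        have h2 : k0 ≤ cN := hmin0 cN (subP_seqP hsubc)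
        have h3 : cN = k0 := by omega
        subst h3
        rfl
    · rw [hbfs.1 (fun k hk => hex ⟨k, hk⟩)]
      cases hg : (PN.foldl (fun b p => pvRelax ((p : Nat) : Int) b.items b)
          (PySem.Dict.empty.insert 0 0)).get? ((tgtN : Nat) : Int) with
      | none => rfl
      | some c =>
        obtain ⟨cN, rfl, hsubc, _⟩ := hsound tgtN c hg
        exact absurd ⟨cN, subP_seqP hsubc⟩ hex

-- ===== VERDICT (by name: the statement is the Claim_ definition above) =====
theorem min_lights_spec : Claim_equal_min_lights := by
  intro pat btns _
  show min_lights pat btns = min_lights_alt pat btns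
  exact pv_main pat btns
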